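-- pv_equiv track=rewrite | github.com/CaioVIN30/Aalgo-2025-1 | DeveresDeCasa/Config.py | subset_soma
-- ===== SOURCE A (Python) =====
-- def subset_soma(arrTeste, intAlvo, parcial=[]):
--     s = sum(parcial)
--
--     # Caso base: se a soma parcial é igual ao alvo, retorna True
--     if s == intAlvo:
--         return True
--
--     # Se a soma parcial exceder o alvo, retorna False
--     if s > intAlvo:
--         return False
--
--     # Tenta incluir cada número do conjunto em turnos
--     for i, n in enumerate(arrTeste):
--         arrRestante = arrTeste[i + 1:]
--         if subset_soma(arrRestante, intAlvo, parcial + [n]):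
--             return True
--
--     return False
-- ===== SOURCE B (Python) =====
-- def subset_soma(arrTeste, intAlvo, parcial=[]):
--     # Iterative DP over the set of reachable partial sums (< intAlvo) instead
--     # of recursive backtracking; same pruning rule (a partial sum > intAlvo
--     # never continues), so identical results, also with negatives.
--     s = sum(parcial)
--     if s == intAlvo:
--         return True
--     reach = {s} if s < intAlvo else set()
--     for n in arrTeste:
--         novos = {r + n for r in reach}
--         if intAlvo in novos:
--             return True
--         reach |= {r for r in novos if r < intAlvo}
--     return False
-- ===== Notes on version B (the rewrite author's own statement) =====
-- stated objective: alternative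
-- what changed: Replaced the recursive backtracking search with an iterative one-pass DP that maintains the set of reachable partial sums below the target (same pruning rule: sums above the target are dropped); it avoids A's exponential worst case but pays a per-element set cost on inputs with many distinct sums.
import Mathlib
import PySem

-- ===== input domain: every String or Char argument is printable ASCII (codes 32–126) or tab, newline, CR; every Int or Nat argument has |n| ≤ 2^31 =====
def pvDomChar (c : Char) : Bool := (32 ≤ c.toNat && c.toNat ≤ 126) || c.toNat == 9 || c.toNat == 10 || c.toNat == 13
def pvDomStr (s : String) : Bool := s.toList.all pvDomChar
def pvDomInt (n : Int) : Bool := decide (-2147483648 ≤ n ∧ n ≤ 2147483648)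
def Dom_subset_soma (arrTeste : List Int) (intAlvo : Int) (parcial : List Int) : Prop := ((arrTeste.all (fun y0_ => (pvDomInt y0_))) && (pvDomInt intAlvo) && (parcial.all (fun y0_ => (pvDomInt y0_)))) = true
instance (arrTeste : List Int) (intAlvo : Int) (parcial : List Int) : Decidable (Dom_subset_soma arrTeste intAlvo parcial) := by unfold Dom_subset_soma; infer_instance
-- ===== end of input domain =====

-- B replaces A's recursive backtracking by a one-pass DP over the set of
-- reachable partial sums below the target (objective: alternative algorithm).

-- ===== PORT A =====
mutual
-- the body of A: s = sum(parcial); the two base checks; then the for-loop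
def subset_soma (arrTeste : List Int) (intAlvo : Int) (parcial : List Int) : Bool :=
  let s := parcial.sum
  if s = intAlvo then true
  else if s > intAlvo then false
  else subsetLoop arrTeste intAlvo parcial
termination_by (arrTeste.length, 1)
decreasing_by simp [Prod.lex_def]

-- 'for i, n in enumerate(arrTeste): arrRestante = arrTeste[i+1:]; …' — each
-- iteration works on the suffix after the current element, i.e. the tail
def subsetLoop (arrTeste : List Int) (intAlvo : Int) (parcial : List Int) : Bool :=
  match arrTeste with
  | [] => false
  | n :: arrRestante =>
      if subset_soma arrRestante intAlvo (parcial ++ [n]) then true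
      else subsetLoop arrRestante intAlvo parcial
termination_by (arrTeste.length, 0)
decreasing_by
  · simp [Prod.lex_def]
  · simp [Prod.lex_def]
end

-- ===== PORT B =====
-- the for-loop of Source B over arrTeste, carrying the set 'reach'
def altGo (intAlvo : Int) (arrTeste : List Int) (reach : PySem.Set Int) : Bool :=
  match arrTeste with
  | [] => false
  | n :: rest =>
      let novos : PySem.Set Int := PySem.Set.ofList (reach.map (fun r => r + n))
      if novos.contains intAlvo then true
      else altGo intAlvo rest (PySem.Set.union reach (novos.filter (fun r => decide (r < intAlvo))))

def subset_soma_alt (arrTeste : List Int) (intAlvo : Int) (parcial : List Int) : Bool :=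
  let s := parcial.sum
  if s = intAlvo then true
  else
    let reach : PySem.Set Int :=
      if s < intAlvo then PySem.Set.ofList [s] else PySem.Set.empty
    altGo intAlvo arrTeste reach

-- ===== PRECONDITION & SPEC =====
def Spec_subset_soma (arrTeste : List Int) (intAlvo : Int) (parcial : List Int) (out : Bool) : Prop :=
  out = subset_soma_alt arrTeste intAlvo parcial
instance (arrTeste : List Int) (intAlvo : Int) (parcial : List Int) (out : Bool) : Decidable (Spec_subset_soma arrTeste intAlvo parcial out) := by unfold Spec_subset_soma; infer_instance

-- ===== CLAIM =====
def Claim_equal_subset_soma : Prop := ∀ (arrTeste : List Int) (intAlvo : Int) (parcial : List Int), Dom_subset_soma arrTeste intAlvo parcial → Spec_subset_soma arrTeste intAlvo parcial (subset_soma arrTeste intAlvo parcial)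

-- ===== LEMMAS AND PROOFS =====

-- common specification: A's search as a function of the current partial sum
def W : List Int → Int → Int → Bool
  | [], t, s => decide (s = t)
  | n :: r, t, s => if s = t then true else if s > t then false else (W r t (s + n) || W r t s)

theorem W_of_eq (arr : List Int) (t : Int) : W arr t t = true := by
  cases arr <;> simp [W]

theorem W_of_gt (arr : List Int) (t s : Int) (h : t < s) : W arr t s = false := by
  cases arr <;> simp [W] <;> omega

theorem loop_eq_W (arr : List Int) (t : Int) (p : List Int)
    (h1 : p.sum ≠ t) (h2 : ¬ p.sum > t) : subsetLoop arr t p = W arr t p.sum := by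
  induction arr generalizing p with
  | nil => simp [subsetLoop, W, h1]
  | cons n rest ih =>
      have hsum : (p ++ [n]).sum = p.sum + n := by simp
      by_cases he : p.sum + n = t
      · rw [subsetLoop, subset_soma, W]
        simp [hsum, he, W_of_eq, h1, h2]
      · by_cases hg : p.sum + n > t
        · rw [subsetLoop, subset_soma, W]
          simp [hsum, he, hg, W_of_gt rest t _ hg, h1, h2, ih p h1 h2]
        · have ihn := ih (p ++ [n]) (by rw [hsum]; exact he) (by rw [hsum]; exact hg)
          rw [subsetLoop, subset_soma, W]
          simp [hsum, he, hg, h1, h2, ihn, ih p h1 h2]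

theorem A_eq_W (arr : List Int) (t : Int) (p : List Int) :
    subset_soma arr t p = W arr t p.sum := by
  rw [subset_soma]
  by_cases he : p.sum = t
  · simp [he, W_of_eq]
  · by_cases hg : p.sum > t
    · simp [he, hg, W_of_gt arr t _ hg]
    · simp [he, hg, loop_eq_W arr t p he hg]

theorem altGo_iff (arr : List Int) (t : Int) (S : PySem.Set Int)
    (hS : ∀ s ∈ S, s < t) :
    altGo t arr S = true ↔ ∃ s ∈ S, W arr t s = true := by
  induction arr generalizing S with
  | nil =>
      simp only [altGo, W, Bool.false_eq_true, false_iff]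
      rintro ⟨s, hs, hW⟩
      have hlt := hS s hs
      simp at hW
      omega
  | cons n rest ih =>
      rw [altGo]
      by_cases hin : (PySem.Set.ofList (S.map (fun r => r + n))).contains t = true
      · rw [if_pos hin]
        rw [PySem.Set.contains_iff, PySem.Set.mem_ofList, List.mem_map] at hin
        obtain ⟨s, hs, heq⟩ := hin
        have hlt := hS s hs
        refine iff_of_true rfl ⟨s, hs, ?_⟩
        rw [W, if_neg (show ¬ s = t by omega), if_neg (show ¬ s > t by omega), heq, W_of_eq]
        simp
      · rw [if_neg hin]
        have hnot : ∀ s ∈ S, s + n ≠ t := by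
          intro s hs he
          exact hin (by
            rw [PySem.Set.contains_iff, PySem.Set.mem_ofList, List.mem_map]
            exact ⟨s, hs, he⟩)
        have hS' : ∀ s ∈ PySem.Set.union S ((PySem.Set.ofList (S.map (fun r => r + n))).filter (fun r => decide (r < t))), s < t := by
          intro s hs
          rw [PySem.Set.mem_union] at hs
          rcases hs with hs | hs
          · exact hS s hs
          · simp [List.mem_filter] at hs; exact hs.2
        rw [ih _ hS']
        constructor
        · rintro ⟨s, hs, hW⟩
          rw [PySem.Set.mem_union] at hs
          rcases hs with hs | hs
          · have hlt := hS s hs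
            refine ⟨s, hs, ?_⟩
            rw [W, if_neg (show ¬ s = t by omega), if_neg (show ¬ s > t by omega)]
            simp [hW]
          · simp [List.mem_filter, PySem.Set.mem_ofList, List.mem_map] at hs
            obtain ⟨⟨r, hr, heq⟩, hlt⟩ := hs
            have hrlt := hS r hr
            refine ⟨r, hr, ?_⟩
            rw [W, if_neg (show ¬ r = t by omega), if_neg (show ¬ r > t by omega), heq]
            simp [hW]
        · rintro ⟨s, hs, hW⟩
          have hlt := hS s hs
          rw [W, if_neg (show ¬ s = t by omega), if_neg (show ¬ s > t by omega)] at hW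
          rw [Bool.or_eq_true] at hW
          rcases hW with hW | hW
          · have hne := hnot s hs
            have hsn : s + n < t := by
              rcases lt_trichotomy (s + n) t with h | h | h
              · exact h
              · exact absurd h hne
              · exact absurd hW (by simp [W_of_gt rest t _ h])
            refine ⟨s + n, ?_, hW⟩
            rw [PySem.Set.mem_union]
            right
            rw [List.mem_filter]
            refine ⟨?_, by simpa using hsn⟩
            rw [PySem.Set.mem_ofList, List.mem_map]
            exact ⟨s, hs, rfl⟩
          · exact ⟨s, by rw [PySem.Set.mem_union]; exact Or.inl hs, hW⟩

theorem B_eq_W (arr : List Int) (t : Int) (p : List Int) :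
    subset_soma_alt arr t p = W arr t p.sum := by
  rw [subset_soma_alt]
  by_cases he : p.sum = t
  · simp [he, W_of_eq]
  · simp only [he, if_false]
    by_cases hl : p.sum < t
    · simp only [hl, if_true]
      have h := altGo_iff arr t (PySem.Set.ofList [p.sum])
        (by intro s hs; simp [PySem.Set.ofList, PySem.Set.add] at hs; omega)
      cases hW : W arr t p.sum
      · cases hgo : altGo t arr (PySem.Set.ofList [p.sum])
        · rfl
        · exfalso
          obtain ⟨s, hs, hWs⟩ := h.mp hgo
          simp [PySem.Set.ofList, PySem.Set.add] at hs
          rw [hs] at hWs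
          simp [hW] at hWs
      · exact h.mpr ⟨p.sum, by simp [PySem.Set.ofList, PySem.Set.add], hW⟩
    · simp only [hl, if_false]
      have hgt : t < p.sum := by omega
      rw [W_of_gt arr t _ hgt]
      cases hgo : altGo t arr PySem.Set.empty
      · rfl
      · exfalso
        obtain ⟨s, hs, _⟩ := (altGo_iff arr t PySem.Set.empty (by simp [PySem.Set.empty])).mp hgo
        simp [PySem.Set.empty] at hs

-- ===== VERDICT =====
theorem subset_soma_spec : Claim_equal_subset_soma := by
  intro arr t p _
  unfold Spec_subset_soma
  rw [A_eq_W, B_eq_W]
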